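-- pv_equiv track=rewrite | github.com/mrBrain101/Yandex_Algorithm_Training_6_2024_GIT | 02_Prefix_sum_and_Two_pointers/06_Sum_of_triplets/sum_of_triples.py | sum_of_triplets
-- ===== SOURCE A (Python) =====
-- def sum_of_triplets(nums, n):
--     MOD = 10**9 + 7
--     prefix_sum = [0] * (n)
--     prefix_sum[0] = nums[0]
--     for i in range(1, n):
--         prefix_sum[i] = prefix_sum[i - 1] + nums[i]
--
--     s1 = [0] * (n)
--     for i in range(n):
--         s1[i] = prefix_sum[n-1] - prefix_sum[i]
--
--     s2 = [0] * (n)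
--     for i in range(n-1, -1, -1):
--         s2[i] = prefix_sum[i] - nums[i]
--
--     res = 0
--     for i in range(n):
--         res += nums[i] * s1[i] * s2[i] % MOD
--     return res % MOD
-- ===== SOURCE B (Python) =====
-- def sum_of_triplets(nums, n):
--     # The answer is the 3rd elementary symmetric polynomial of nums[0:n],
--     # computed from power sums via Newton's identities (exact integer division).
--     MOD = 10**9 + 7
--     p1 = p2 = p3 = 0
--     for i in range(n):
--         x = nums[i]
--         p1 += x
--         p2 += x * x
--         p3 += x * x * x
--     e3 = (p1**3 - 3 * p1 * p2 + 2 * p3) // 6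
--     return e3 % MOD
-- ===== Notes on version B (the rewrite author's own statement) =====
-- stated objective: alternative
-- what changed: Replaced the four array-building passes (prefix sums, suffix-sum array, before-sum array, per-term modular sum) by one pass accumulating power sums p1,p2,p3 and the closed-form Newton identity e3 = (p1^3 - 3*p1*p2 + 2*p3)//6, returning e3 mod 10^9+7; O(1) extra space instead of four length-n lists.
import Mathlib
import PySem

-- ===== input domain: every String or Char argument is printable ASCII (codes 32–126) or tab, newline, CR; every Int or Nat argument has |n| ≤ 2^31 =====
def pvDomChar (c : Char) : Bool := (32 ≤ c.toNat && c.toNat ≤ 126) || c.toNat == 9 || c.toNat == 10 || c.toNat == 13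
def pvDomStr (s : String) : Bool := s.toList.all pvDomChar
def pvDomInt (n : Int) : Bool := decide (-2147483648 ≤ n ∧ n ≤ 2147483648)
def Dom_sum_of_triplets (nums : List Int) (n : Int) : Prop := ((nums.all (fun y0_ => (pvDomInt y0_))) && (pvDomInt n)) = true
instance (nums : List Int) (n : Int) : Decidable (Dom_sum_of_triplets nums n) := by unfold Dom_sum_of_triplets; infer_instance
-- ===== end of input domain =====

-- B replaces A's four array passes by one power-sum pass and the closed-form
-- Newton identity e3 = (p1^3 - 3*p1*p2 + 2*p3) // 6; return value only.

-- ===== PORT A =====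
def sum_of_triplets (nums : List Int) (n : Int) : Int :=
  let MOD : Int := 10 ^ 9 + 7
  let pfx0 := PySem.List.pyRepeat [(0 : Int)] n
  let pfx1 := PySem.List.pySetD pfx0 0 (PySem.List.pyGetD nums 0 0)
  let pfx := (PySem.List.pyRange 1 n 1).foldl
      (fun ps i => PySem.List.pySetD ps i
        (PySem.List.pyGetD ps (i - 1) 0 + PySem.List.pyGetD nums i 0)) pfx1
  let s1 := (PySem.List.pyRange 0 n 1).foldl
      (fun s i => PySem.List.pySetD s i
        (PySem.List.pyGetD pfx (n - 1) 0 - PySem.List.pyGetD pfx i 0))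
      (PySem.List.pyRepeat [(0 : Int)] n)
  let s2 := (PySem.List.pyRange (n - 1) (-1) (-1)).foldl
      (fun s i => PySem.List.pySetD s i
        (PySem.List.pyGetD pfx i 0 - PySem.List.pyGetD nums i 0))
      (PySem.List.pyRepeat [(0 : Int)] n)
  let res := (PySem.List.pyRange 0 n 1).foldl
      (fun r i => r + PySem.Int.mod
        (PySem.List.pyGetD nums i 0 * PySem.List.pyGetD s1 i 0 * PySem.List.pyGetD s2 i 0) MOD) 0
  PySem.Int.mod res MOD

-- ===== PORT B =====
def sum_of_triplets_alt (nums : List Int) (n : Int) : Int :=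
  let MOD : Int := 10 ^ 9 + 7
  let p := (PySem.List.pyRange 0 n 1).foldl
      (fun (acc : Int × Int × Int) i =>
        let x := PySem.List.pyGetD nums i 0
        (acc.1 + x, acc.2.1 + x * x, acc.2.2 + x * x * x)) (0, 0, 0)
  let e3 := PySem.Int.floordiv (p.1 ^ 3 - 3 * p.1 * p.2.1 + 2 * p.2.2) 6
  PySem.Int.mod e3 MOD

-- ===== PRECONDITION & SPEC =====
-- A raises IndexError when n < 1 (prefix_sum[0] on an empty list) or when
-- n exceeds len(nums) (nums[i]); Pre_ excludes exactly those inputs.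
def Pre_sum_of_triplets (nums : List Int) (n : Int) : Prop :=
  1 ≤ n ∧ n ≤ nums.length
instance (nums : List Int) (n : Int) : Decidable (Pre_sum_of_triplets nums n) := by
  unfold Pre_sum_of_triplets; infer_instance
def pvWitness_sum_of_triplets : List Int × Int := ([1, 2, 3, 4], 3)

def Spec_sum_of_triplets (nums : List Int) (n : Int) (out : Int) : Prop :=
  out = sum_of_triplets_alt nums n
instance (nums : List Int) (n : Int) (out : Int) : Decidable (Spec_sum_of_triplets nums n out) := by
  unfold Spec_sum_of_triplets; infer_instance

-- ===== CLAIM (what is proved, stated in full; the proofs are below) =====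
def Claim_equal_sum_of_triplets : Prop := ∀ (nums : List Int) (n : Int),
  Dom_sum_of_triplets nums n → Pre_sum_of_triplets nums n →
  Spec_sum_of_triplets nums n (sum_of_triplets nums n)

-- ===== LEMMAS AND PROOFS =====

-- prefix sum of the first m entries
def pvP (xs : List Int) (m : Nat) : Int := ((xs.take m).sum)

-- elementary symmetric polynomials, structurally
def pvE2 : List Int → Int
  | [] => 0
  | x :: t => x * t.sum + pvE2 t
def pvE3 : List Int → Int
  | [] => 0
  | x :: t => x * pvE2 t + pvE3 t

theorem pvNewton2 (xs : List Int) :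
    2 * pvE2 xs = xs.sum ^ 2 - (xs.map (fun x => x * x)).sum := by
  induction xs with
  | nil => simp [pvE2]
  | cons x t ih => simp [pvE2, List.sum_cons]; ring_nf; ring_nf at ih; linarith

theorem pvNewton3 (xs : List Int) :
    6 * pvE3 xs = xs.sum ^ 3 - 3 * xs.sum * (xs.map (fun x => x * x)).sum
      + 2 * (xs.map (fun x => x * x * x)).sum := by
  induction xs with
  | nil => simp [pvE3]
  | cons x t ih =>
    have h2 := pvNewton2 t
    simp [pvE3, List.sum_cons]
    linear_combination 3 * x * h2 + ih


theorem pvFoldAdd {α : Type} (l : List α) (f : α → Int) (c : Int) :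
    l.foldl (fun r x => r + f x) c = c + (l.map f).sum := by
  induction l generalizing c with
  | nil => simp
  | cons x t ih => simp [List.foldl_cons, ih]; ring

theorem pvSumMapAdd {α : Type} (l : List α) (f g : α → Int) :
    (l.map (fun x => f x + g x)).sum = (l.map f).sum + (l.map g).sum := by
  induction l with
  | nil => simp
  | cons x t ih => simp [ih]; ring

theorem pvSumMod (l : List Int) (M : Int) :
    ((l.map (fun x => x % M)).sum) % M = l.sum % M := by
  induction l with
  | nil => simp
  | cons x t ih =>
    simp only [List.map_cons, List.sum_cons]
    rw [Int.add_emod, Int.emod_emod_of_dvd x dvd_rfl, ih, ← Int.add_emod]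

theorem pvP_succ (xs : List Int) (m : Nat) (h : m < xs.length) :
    pvP xs (m + 1) = pvP xs m + xs.getD m 0 := by
  unfold pvP
  rw [List.take_add_one]
  simp [List.getD, h]

theorem pvFoldSet (g : Int → Int) (l : List Int) (init : List Int)
    (hl : ∀ i ∈ l, 0 ≤ i) (k : Nat) (hk : k < init.length) :
    (l.foldl (fun s i => PySem.List.pySetD s i (g i)) init).getD k 0 =
      if (k : Int) ∈ l then g (k : Int) else init.getD k 0 := by
  induction l generalizing init with
  | nil => simp
  | cons i t ih =>
    have hi : 0 ≤ i := hl i (by simp)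
    have hset : PySem.List.pySetD init i (g i) = init.set i.toNat (g i) :=
      PySem.List.pySetD_of_nonneg init (g i) hi
    have hlen : (PySem.List.pySetD init i (g i)).length = init.length := by
      rw [hset]; simp
    rw [List.foldl_cons,
      ih (PySem.List.pySetD init i (g i)) (fun j hj => hl j (List.mem_cons_of_mem _ hj)) (by omega)]
    by_cases hmem : (k : Int) ∈ t
    · simp [hmem]
    · simp only [hmem, if_false, List.mem_cons, or_false]
      by_cases heq : (k : Int) = i
      · have : i.toNat = k := by omega
        subst this
        simp [heq, hset, List.getD_eq_getElem?_getD, hk]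
      · have hne : i.toNat ≠ k := by omega
        simp only [heq, if_false]
        rw [hset, List.getD_eq_getElem?_getD, List.getElem?_set_ne hne,
          ← List.getD_eq_getElem?_getD]

theorem pvExtMap (L : List Int) (N : Nat) (f : Nat → Int) (hlen : L.length = N)
    (h : ∀ k, k < N → L.getD k 0 = f k) : L = (List.range N).map f := by
  apply List.ext_getElem
  · simp [hlen]
  · intro k h1 h2
    have := h k (by simpa using h2)
    rw [List.getD_eq_getElem L 0 h1] at this
    simpa using this

theorem pvGetDMapRange (f : Nat → Int) (N k : Nat) (hk : k < N) :
    ((List.range N).map f).getD k 0 = f k := by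
  simp [List.getD_eq_getElem?_getD, hk]

theorem pvSetMapRange (f : Nat → Int) (N m : Nat) (v : Int) :
    ((List.range N).map f).set m v = (List.range N).map (fun k => if k = m then v else f k) := by
  apply pvExtMap _ _ _ (by simp)
  intro k hk
  by_cases h : k = m
  · subst h
    rw [List.getD_eq_getElem?_getD, List.getElem?_set_self (by simp [hk])]
    simp
  · rw [List.getD_eq_getElem?_getD, List.getElem?_set_ne (fun hc => h hc.symm),
      ← List.getD_eq_getElem?_getD, pvGetDMapRange _ _ _ hk]
    simp [h]

theorem pvSumE2 (xs : List Int) :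
    ((List.range xs.length).map
      (fun k => xs.getD k 0 * (xs.sum - pvP xs (k + 1)))).sum = pvE2 xs := by
  induction xs with
  | nil => simp [pvE2]
  | cons x t ih =>
    rw [List.length_cons, List.range_succ_eq_map, List.map_cons, List.map_map, List.sum_cons]
    have hfun : ∀ k ∈ List.range t.length,
        ((fun k => (x :: t).getD k 0 * ((x :: t).sum - pvP (x :: t) (k + 1))) ∘ Nat.succ) k
          = t.getD k 0 * (t.sum - pvP t (k + 1)) := by
      intro k _
      simp only [Function.comp, List.getD_cons_succ, List.sum_cons, pvP,
        List.take_succ_cons, List.sum_cons]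
      ring
    rw [List.map_congr_left hfun, ih]
    simp [pvP, pvE2, List.sum_cons]

theorem pvSumE3 (xs : List Int) :
    ((List.range xs.length).map
      (fun k => xs.getD k 0 * (xs.sum - pvP xs (k + 1)) * pvP xs k)).sum = pvE3 xs := by
  induction xs with
  | nil => simp [pvE3]
  | cons x t ih =>
    rw [List.length_cons, List.range_succ_eq_map, List.map_cons, List.map_map, List.sum_cons]
    have hfun : ∀ k ∈ List.range t.length,
        ((fun k => (x :: t).getD k 0 * ((x :: t).sum - pvP (x :: t) (k + 1)) * pvP (x :: t) k) ∘ Nat.succ) k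
          = t.getD k 0 * (t.sum - pvP t (k + 1)) * pvP t k
            + x * (t.getD k 0 * (t.sum - pvP t (k + 1))) := by
      intro k _
      simp only [Function.comp, List.getD_cons_succ, List.sum_cons, pvP,
        List.take_succ_cons, List.sum_cons]
      ring
    rw [List.map_congr_left hfun, pvSumMapAdd, ih, List.sum_map_mul_left, pvSumE2]
    simp [pvP, pvE3]
    ring

theorem pvPrefix (nums : List Int) (N : Nat) (h2 : N ≤ nums.length)
    (m : Nat) (hm1 : 1 ≤ m) (hm2 : m ≤ N) :
    (PySem.List.pyRange 1 (m : Int) 1).foldl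
      (fun ps i => PySem.List.pySetD ps i
        (PySem.List.pyGetD ps (i - 1) 0 + PySem.List.pyGetD nums i 0))
      (PySem.List.pySetD (PySem.List.pyRepeat [(0 : Int)] (N : Int)) 0
        (PySem.List.pyGetD nums 0 0)) =
    (List.range N).map (fun k => if k < m then pvP nums (k + 1) else 0) := by
  induction m with
  | zero => omega
  | succ m ih =>
    by_cases hm : m = 0
    · subst hm
      rw [show ((0 + 1 : Nat) : Int) = 1 by norm_num, PySem.List.pyRange_one_eq_nil le_rfl,
        List.foldl_nil]
      have hrep : PySem.List.pyRepeat [(0 : Int)] (N : Int) = List.replicate N (0 : Int) := by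
        rw [PySem.List.pyRepeat_singleton]; norm_num
      rw [hrep, PySem.List.pySetD_of_nonneg _ _ le_rfl]
      simp only [Int.toNat_zero]
      apply pvExtMap _ _ _ (by simp)
      intro k hk
      by_cases h : k = 0
      · subst h
        rw [List.getD_eq_getElem?_getD, List.getElem?_set_self (by simpa using hk)]
        obtain ⟨a, t, rfl⟩ : ∃ a t, nums = a :: t := by
          cases nums with
          | nil => simp at h2; omega
          | cons a t => exact ⟨a, t, rfl⟩
        simp [pvP, PySem.List.pyGetD_zero]
      · rw [List.getD_eq_getElem?_getD, List.getElem?_set_ne (fun hc => h hc.symm)]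
        simp [hk, h]
    · have hm1' : 1 ≤ m := by omega
      have hcast : ((m + 1 : Nat) : Int) = (m : Int) + 1 := by push_cast; ring
      rw [hcast, PySem.List.pyRange_one_succ_right (by exact_mod_cast hm1'),
        List.foldl_append, List.foldl_cons, List.foldl_nil,
        ih hm1' (by omega)]
      have hc1 : ((m : Int) - 1) = ((m - 1 : Nat) : Int) := by omega
      rw [hc1, PySem.List.pyGetD_natCast, PySem.List.pyGetD_natCast,
        pvGetDMapRange _ _ _ (by omega : m - 1 < N),
        PySem.List.pySetD_natCast]
      have hv : (if m - 1 < m then pvP nums (m - 1 + 1) else 0) + nums.getD m 0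
          = pvP nums (m + 1) := by
        rw [if_pos (by omega), show m - 1 + 1 = m by omega, pvP_succ nums m (by omega)]
      rw [hv, pvSetMapRange]
      apply List.map_congr_left
      intro k _
      by_cases h : k = m
      · simp [h]
      · rw [if_neg h]
        by_cases hkm : k < m
        · rw [if_pos hkm, if_pos (by omega)]
        · rw [if_neg hkm, if_neg (by omega)]

theorem pvFoldlCongr {α β : Type} (l : List α) (f g : β → α → β) (init : β)
    (h : ∀ b, ∀ a ∈ l, f b a = g b a) : l.foldl f init = l.foldl g init := by
  induction l generalizing init with
  | nil => rfl
  | cons x t ih =>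
    rw [List.foldl_cons, List.foldl_cons, h init x (by simp)]
    exact ih _ (fun b a ha => h b a (by simp [ha]))

theorem pvIdxFold {β : Type} (xs : List Int) (h : β → Int → β) (init : β) :
    (List.range xs.length).foldl (fun acc k => h acc (xs.getD k 0)) init = xs.foldl h init := by
  induction xs generalizing init with
  | nil => rfl
  | cons x t ih =>
    rw [List.length_cons, List.range_succ_eq_map, List.foldl_cons, List.foldl_map]
    simp only [List.getD_cons_succ, List.getD_cons_zero]
    exact ih (h init x)

theorem pvPow (xs : List Int) (a b c : Int) :
    xs.foldl (fun acc x => (acc.1 + x, acc.2.1 + x * x, acc.2.2 + x * x * x)) (a, b, c)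
      = (a + xs.sum, b + (xs.map (fun x => x * x)).sum, c + (xs.map (fun x => x * x * x)).sum) := by
  induction xs generalizing a b c with
  | nil => simp
  | cons x t ih =>
    rw [List.foldl_cons, ih]
    simp [List.sum_cons]
    refine ⟨by ring, by ring, by ring⟩

theorem pvFoldSetNatLen (g : Nat → Int) (M : Nat) (init : List Int) :
    ((List.range M).foldl (fun s (i : Nat) => PySem.List.pySetD s (i : Int) (g i)) init).length
      = init.length := by
  induction M with
  | zero => rfl
  | succ n ih =>
    rw [List.range_succ, List.foldl_append, List.foldl_cons, List.foldl_nil,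
      PySem.List.pySetD_of_nonneg _ _ (by positivity), List.length_set, ih]

theorem pvFoldSetNat (g : Nat → Int) (M : Nat) (init : List Int) (k : Nat)
    (hk : k < init.length) :
    ((List.range M).foldl (fun s (i : Nat) => PySem.List.pySetD s (i : Int) (g i)) init).getD k 0
      = if k < M then g k else init.getD k 0 := by
  induction M with
  | zero => simp
  | succ n ih =>
    rw [List.range_succ, List.foldl_append, List.foldl_cons, List.foldl_nil,
      PySem.List.pySetD_of_nonneg _ _ (by positivity), Int.toNat_natCast]
    by_cases h : k = n
    · subst h
      rw [List.getD_eq_getElem?_getD,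
        List.getElem?_set_self (by rw [pvFoldSetNatLen]; omega), Option.getD_some,
        if_pos (by omega)]
    · rw [List.getD_eq_getElem?_getD, List.getElem?_set_ne (fun hc => h hc.symm),
        ← List.getD_eq_getElem?_getD, ih]
      by_cases hkn : k < n
      · rw [if_pos hkn, if_pos (by omega)]
      · rw [if_neg hkn, if_neg (by omega)]

theorem pvMain (nums : List Int) (N : Nat) (h1 : 1 ≤ N) (h2 : N ≤ nums.length) :
    sum_of_triplets nums (N : Int) = sum_of_triplets_alt nums (N : Int) := by
  have hM : (0 : Int) < 10 ^ 9 + 7 := by norm_num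
  have hrep : PySem.List.pyRepeat [(0 : Int)] (N : Int) = List.replicate N (0 : Int) := by
    rw [PySem.List.pyRepeat_singleton]; norm_num
  simp only [sum_of_triplets, sum_of_triplets_alt]
  rw [pvPrefix nums N h2 N h1 le_rfl]
  have hdrop : (List.range N).map (fun k => if k < N then pvP nums (k + 1) else 0)
      = (List.range N).map (fun k => pvP nums (k + 1)) := by
    apply List.map_congr_left; intro k hk; rw [if_pos (List.mem_range.mp hk)]
  rw [hdrop]
  set PFX := (List.range N).map (fun k => pvP nums (k + 1)) with hPFXdef
  have hpfxtop : PySem.List.pyGetD PFX ((N : Int) - 1) 0 = pvP nums N := by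
    rw [show ((N : Int) - 1) = ((N - 1 : Nat) : Int) by omega, PySem.List.pyGetD_natCast,
      hPFXdef, pvGetDMapRange _ _ _ (by omega), show N - 1 + 1 = N by omega]
  have hpfxat : ∀ k : Nat, k < N → PySem.List.pyGetD PFX (k : Int) 0 = pvP nums (k + 1) := by
    intro k hk
    rw [PySem.List.pyGetD_natCast, hPFXdef, pvGetDMapRange _ _ _ hk]
  have hS1 : ∀ k : Nat, k < N →
      PySem.List.pyGetD
        ((List.range N).foldl
          (fun s (i : Nat) => PySem.List.pySetD s (i : Int)
            (PySem.List.pyGetD PFX ((N : Int) - 1) 0 - PySem.List.pyGetD PFX (i : Int) 0))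
          (PySem.List.pyRepeat [(0 : Int)] (N : Int))) (k : Int) 0
      = pvP nums N - pvP nums (k + 1) := by
    intro k hk
    rw [PySem.List.pyGetD_natCast, hrep,
      pvFoldSetNat _ _ _ _ (by simpa using hk), if_pos hk, hpfxtop, hpfxat k hk]
  have hS2 : ∀ k : Nat, k < N →
      PySem.List.pyGetD
        ((PySem.List.pyRange ((N : Int) - 1) (-1) (-1)).foldl
          (fun s i => PySem.List.pySetD s i
            (PySem.List.pyGetD PFX i 0 - PySem.List.pyGetD nums i 0))
          (PySem.List.pyRepeat [(0 : Int)] (N : Int))) (k : Int) 0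
      = pvP nums k := by
    intro k hk
    rw [PySem.List.pyGetD_natCast, hrep]
    rw [pvFoldSet _ _ _
      (fun i hi => by have := PySem.List.mem_pyRange_neg_one.mp hi; omega) k (by simpa using hk)]
    rw [if_pos (PySem.List.mem_pyRange_neg_one.mpr ⟨by omega, by omega⟩)]
    rw [hpfxat k hk, PySem.List.pyGetD_natCast]
    have := pvP_succ nums k (by omega)
    omega
  rw [PySem.List.pyRange_zero_natCast]
  simp only [List.foldl_map]
  rw [pvFoldAdd, zero_add]
  set xs := nums.take N with hxsdef
  have hxslen : xs.length = N := by rw [hxsdef, List.length_take]; omega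
  have hxsget : ∀ k : Nat, k < N → nums.getD k 0 = xs.getD k 0 := by
    intro k hk
    rw [hxsdef, List.getD_eq_getElem?_getD, List.getD_eq_getElem?_getD,
      List.getElem?_take_of_lt hk]
  have hpvp : ∀ j : Nat, j ≤ N → pvP xs j = pvP nums j := by
    intro j hj
    rw [hxsdef]; unfold pvP
    rw [List.take_take, min_eq_left hj]
  have hxsum : xs.sum = pvP nums N := by rw [hxsdef]; rfl
  have hterm : ∀ k ∈ List.range N,
      PySem.Int.mod
        (PySem.List.pyGetD nums (k : Int) 0 *
          PySem.List.pyGetD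
            ((List.range N).foldl
              (fun s (i : Nat) => PySem.List.pySetD s (i : Int)
                (PySem.List.pyGetD PFX ((N : Int) - 1) 0 - PySem.List.pyGetD PFX (i : Int) 0))
              (PySem.List.pyRepeat [(0 : Int)] (N : Int))) (k : Int) 0 *
          PySem.List.pyGetD
            ((PySem.List.pyRange ((N : Int) - 1) (-1) (-1)).foldl
              (fun s i => PySem.List.pySetD s i
                (PySem.List.pyGetD PFX i 0 - PySem.List.pyGetD nums i 0))
              (PySem.List.pyRepeat [(0 : Int)] (N : Int))) (k : Int) 0) (10 ^ 9 + 7)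
      = (xs.getD k 0 * (xs.sum - pvP xs (k + 1)) * pvP xs k) % (10 ^ 9 + 7) := by
    intro k hk
    have hkN := List.mem_range.mp hk
    rw [hS1 k hkN, hS2 k hkN, PySem.List.pyGetD_natCast,
      PySem.Int.mod_eq_emod_of_pos hM, hxsget k hkN,
      hxsum, hpvp (k + 1) (by omega), hpvp k (by omega)]
  have hcg : (List.range N).foldl
      (fun (acc : Int × Int × Int) (k : Nat) =>
        (acc.1 + PySem.List.pyGetD nums (k : Int) 0,
         acc.2.1 + PySem.List.pyGetD nums (k : Int) 0 * PySem.List.pyGetD nums (k : Int) 0,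
         acc.2.2 + PySem.List.pyGetD nums (k : Int) 0 * PySem.List.pyGetD nums (k : Int) 0 *
           PySem.List.pyGetD nums (k : Int) 0)) ((0 : Int), (0 : Int), (0 : Int))
      = (xs.sum, (xs.map (fun x => x * x)).sum, (xs.map (fun x => x * x * x)).sum) := by
    rw [pvFoldlCongr _ _
      (fun (acc : Int × Int × Int) (k : Nat) =>
        (acc.1 + xs.getD k 0, acc.2.1 + xs.getD k 0 * xs.getD k 0,
         acc.2.2 + xs.getD k 0 * xs.getD k 0 * xs.getD k 0)) _
      (by
        intro b a ha
        have haN := List.mem_range.mp ha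
        rw [PySem.List.pyGetD_natCast, hxsget a haN])]
    have hfold := pvIdxFold xs
      (fun acc x => (acc.1 + x, acc.2.1 + x * x, acc.2.2 + x * x * x))
      ((0 : Int), (0 : Int), (0 : Int))
    rw [hxslen] at hfold
    rw [hfold, pvPow]
    simp
  rw [List.map_congr_left hterm, hcg]
  simp only []
  have hcomp : (fun k => (xs.getD k 0 * (xs.sum - pvP xs (k + 1)) * pvP xs k) % (10 ^ 9 + 7))
      = (fun x => x % (10 ^ 9 + 7)) ∘ (fun k => xs.getD k 0 * (xs.sum - pvP xs (k + 1)) * pvP xs k) := rfl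
  rw [hcomp, ← List.map_map, PySem.Int.mod_eq_emod_of_pos hM, pvSumMod, ← hxslen, pvSumE3]
  rw [← pvNewton3 xs, PySem.Int.floordiv_eq_ediv_of_pos (by norm_num),
    Int.mul_ediv_cancel_left _ (by norm_num : (6 : Int) ≠ 0),
    PySem.Int.mod_eq_emod_of_pos hM]

-- ===== VERDICT (by name: the statement is the Claim_ definition above) =====
theorem sum_of_triplets_spec : Claim_equal_sum_of_triplets := by
  intro nums n _ hpre
  unfold Spec_sum_of_triplets
  obtain ⟨hp1, hp2⟩ := hpre
  rw [show n = ((n.toNat : Nat) : Int) by omega]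
  exact pvMain nums n.toNat (by omega) (by omega)
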